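-- pv_equiv track=rewrite | github.com/AverageJoe85/CSI4900-Honours-Project | Code/gameOf24Optimized.py | calculate_remaining_numbers
-- ===== SOURCE A (Python) =====
-- def calculate_remaining_numbers(remaining_numbers, step):
--     current_nums = remaining_numbers.copy()
--     used_nums = [step["numberX"], step["numberY"]]
--     for num in used_nums:
--         if num in current_nums:
--             current_nums.remove(num)
--     current_nums.append(step["numberZ"])
--     return current_nums
-- ===== SOURCE B (Python) =====
-- def calculate_remaining_numbers(remaining_numbers, step):
--     to_remove = {}
--     for n in (step["numberX"], step["numberY"]):
--         to_remove[n] = to_remove.get(n, 0) + 1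
--     result = []
--     for e in remaining_numbers:
--         if to_remove.get(e, 0) > 0:
--             to_remove[e] -= 1
--         else:
--             result.append(e)
--     result.append(step["numberZ"])
--     return result
-- ===== Notes on version B (the rewrite author's own statement) =====
-- stated objective: alternative
-- what changed: Instead of copying the list and calling list.remove for each used number (each remove is an O(n) scan), B builds a 2-element count map of the numbers to drop and emits the result in one left-to-right pass, appending numberZ at the end.
import Mathlib
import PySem

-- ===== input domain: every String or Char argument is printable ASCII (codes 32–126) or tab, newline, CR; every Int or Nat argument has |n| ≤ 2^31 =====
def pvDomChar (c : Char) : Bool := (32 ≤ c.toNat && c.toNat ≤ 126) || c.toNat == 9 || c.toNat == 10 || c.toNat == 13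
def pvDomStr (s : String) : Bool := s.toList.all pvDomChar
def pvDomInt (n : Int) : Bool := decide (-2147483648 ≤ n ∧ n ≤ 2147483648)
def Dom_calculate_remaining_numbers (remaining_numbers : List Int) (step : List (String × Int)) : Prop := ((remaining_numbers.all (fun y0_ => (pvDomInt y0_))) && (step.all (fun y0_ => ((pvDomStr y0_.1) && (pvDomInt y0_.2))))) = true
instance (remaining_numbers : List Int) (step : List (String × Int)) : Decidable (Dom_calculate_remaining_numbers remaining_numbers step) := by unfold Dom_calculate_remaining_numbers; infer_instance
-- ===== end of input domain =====

-- B replaces copy + two list.remove scans by a count map of the two used numbers and one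
-- left-to-right pass over remaining_numbers; return values proved equal whenever the three keys exist.

-- ===== PORT A =====
-- step["k"] under Pre_ is a successful dict lookup; getD 0 is the total form (Pre_ guarantees the key exists).
def calculate_remaining_numbers (remaining_numbers : List Int) (step : List (String × Int)) : List Int :=
  let current_nums := remaining_numbers
  let used_nums : List Int :=
    [PySem.Dict.getD ⟨step⟩ "numberX" 0, PySem.Dict.getD ⟨step⟩ "numberY" 0]
  let current_nums := used_nums.foldl
    (fun cur num => if num ∈ cur then (PySem.List.remove? cur num).getD cur else cur) current_nums
  current_nums ++ [PySem.Dict.getD ⟨step⟩ "numberZ" 0]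

-- ===== PORT B =====
def calculate_remaining_numbers_alt (remaining_numbers : List Int) (step : List (String × Int)) : List Int :=
  let to_remove : PySem.Dict Int Int :=
    [PySem.Dict.getD ⟨step⟩ "numberX" 0, PySem.Dict.getD ⟨step⟩ "numberY" 0].foldl
      (fun d n => d.insert n (d.getD n 0 + 1)) PySem.Dict.empty
  let result := remaining_numbers.foldl
    (fun (p : List Int × PySem.Dict Int Int) e =>
      if p.2.getD e 0 > 0 then (p.1, p.2.insert e (p.2.getD e 0 - 1)) else (p.1 ++ [e], p.2))
    ([], to_remove)
  result.1 ++ [PySem.Dict.getD ⟨step⟩ "numberZ" 0]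

-- ===== PRECONDITION & SPEC =====
-- Pre_: the Python raises KeyError unless all three keys "numberX","numberY","numberZ" are present.
def Pre_calculate_remaining_numbers (remaining_numbers : List Int) (step : List (String × Int)) : Prop :=
  (PySem.Dict.get? ⟨step⟩ "numberX").isSome = true ∧
  (PySem.Dict.get? ⟨step⟩ "numberY").isSome = true ∧
  (PySem.Dict.get? ⟨step⟩ "numberZ").isSome = true
instance (remaining_numbers : List Int) (step : List (String × Int)) : Decidable (Pre_calculate_remaining_numbers remaining_numbers step) := by unfold Pre_calculate_remaining_numbers; infer_instance

def pvWitness_calculate_remaining_numbers : List Int × (List (String × Int)) :=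
  ([1, 2, 3], [("numberX", 1), ("numberY", 2), ("numberZ", 3)])

def Spec_calculate_remaining_numbers (remaining_numbers : List Int) (step : List (String × Int)) (out : List Int) : Prop := out = calculate_remaining_numbers_alt remaining_numbers step
instance (remaining_numbers : List Int) (step : List (String × Int)) (out : List Int) : Decidable (Spec_calculate_remaining_numbers remaining_numbers step out) := by unfold Spec_calculate_remaining_numbers; infer_instance

-- ===== CLAIM (what is proved, stated in full; the proofs are below) =====
def Claim_equal_calculate_remaining_numbers : Prop := ∀ (remaining_numbers : List Int) (step : List (String × Int)), Dom_calculate_remaining_numbers remaining_numbers step → Pre_calculate_remaining_numbers remaining_numbers step → Spec_calculate_remaining_numbers remaining_numbers step (calculate_remaining_numbers remaining_numbers step)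

-- ===== LEMMAS AND PROOFS =====

-- abstract model of B's single pass: a count function instead of the dict
def pvModel : List Int → (Int → Int) → List Int
  | [], _ => []
  | e :: l, c => if c e > 0 then pvModel l (fun e' => if e' = e then c e - 1 else c e') else e :: pvModel l c

def pvCf (s : List Int) : Int → Int := fun e => (s.count e : Int)

lemma pvModel_congr (l : List Int) {c c' : Int → Int} (h : ∀ e, c e = c' e) :
    pvModel l c = pvModel l c' := by
  have : c = c' := funext h
  rw [this]

-- bridge: B's foldl pass equals acc ++ pvModel over the dict's counts
lemma pass_eq_model (l : List Int) : ∀ (acc : List Int) (d : PySem.Dict Int Int),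
    (l.foldl (fun (p : List Int × PySem.Dict Int Int) e =>
      if p.2.getD e 0 > 0 then (p.1, p.2.insert e (p.2.getD e 0 - 1)) else (p.1 ++ [e], p.2))
      (acc, d)).1 = acc ++ pvModel l (fun e => d.getD e 0) := by
  induction l with
  | nil => intro acc d; simp [pvModel]
  | cons e l ih =>
    intro acc d
    by_cases h : d.getD e 0 > 0
    · rw [List.foldl_cons, if_pos h, ih]
      have hm : pvModel (e :: l) (fun e' => d.getD e' 0) =
          pvModel l (fun e' => if e' = e then d.getD e 0 - 1 else d.getD e' 0) := by
        simp only [pvModel, if_pos h]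
      rw [hm]
      congr 1
      apply pvModel_congr
      intro e'
      rw [PySem.Dict.getD_insert]
    · rw [List.foldl_cons, if_neg h, ih]
      have hm : pvModel (e :: l) (fun e' => d.getD e' 0) =
          e :: pvModel l (fun e' => d.getD e' 0) := by
        simp only [pvModel, if_neg h]
      rw [hm]
      simp

lemma cf_cons_pos {x : Int} {s : List Int} (e : Int) (he : e = x ∨ e ∈ s) : pvCf (x :: s) e > 0 := by
  simp only [pvCf, List.count_cons]
  rcases he with h | h
  · simp [h]
  · have := List.count_pos_iff.mpr h
    omega

lemma pvModel_cf_nil (l : List Int) : pvModel l (pvCf []) = l := by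
  induction l with
  | nil => rfl
  | cons e l ih =>
    have : ¬ pvCf [] e > 0 := by simp [pvCf]
    simp [pvModel, this, ih]

lemma pvModel_cf_single (l : List Int) (y : Int) : pvModel l (pvCf [y]) = l.erase y := by
  induction l with
  | nil => rfl
  | cons e l ih =>
    by_cases hey : e = y
    · subst hey
      have hpos : pvCf [e] e > 0 := cf_cons_pos e (Or.inl rfl)
      simp only [pvModel, if_pos hpos, List.erase_cons_head]
      rw [pvModel_congr l (c' := pvCf []), pvModel_cf_nil]
      intro e'
      simp only [pvCf, List.count_cons, List.count_nil, beq_iff_eq]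
      push_cast
      split_ifs <;> omega
    · have hneg : ¬ pvCf [y] e > 0 := by
        simp only [pvCf, List.count_cons, List.count_nil, beq_iff_eq]
        push_cast
        split_ifs <;> omega
      simp [pvModel, hneg, ih, List.erase_cons_tail, hey]

lemma pvModel_cf_pair (l : List Int) (x y : Int) :
    pvModel l (pvCf [x, y]) = (l.erase x).erase y := by
  induction l with
  | nil => rfl
  | cons e l ih =>
    by_cases hex : e = x
    · subst hex
      have hpos : pvCf [e, y] e > 0 := cf_cons_pos e (Or.inl rfl)
      simp only [pvModel, if_pos hpos, List.erase_cons_head]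
      rw [pvModel_congr l (c' := pvCf [y]), pvModel_cf_single]
      intro e'
      simp only [pvCf, List.count_cons, List.count_nil, beq_iff_eq]
      push_cast
      split_ifs <;> omega
    · by_cases hey : e = y
      · subst hey
        have hpos : pvCf [x, e] e > 0 := cf_cons_pos e (Or.inr (by simp))
        simp only [pvModel, if_pos hpos]
        rw [pvModel_congr l (c' := pvCf [x]), pvModel_cf_single]
        · rw [List.erase_cons_tail (by simpa using fun h => hex h), List.erase_cons_head]
        · intro e'
          simp only [pvCf, List.count_cons, List.count_nil, beq_iff_eq]
          push_cast
          split_ifs <;> omega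
      · have hneg : ¬ pvCf [x, y] e > 0 := by
          simp only [pvCf, List.count_cons, List.count_nil, beq_iff_eq]
          push_cast
          split_ifs <;> omega
        simp only [pvModel, if_neg hneg, ih]
        rw [List.erase_cons_tail (by simpa using hex), List.erase_cons_tail (by simpa using hey)]

-- A's guarded remove step is List.erase
lemma a_step_eq_erase (cur : List Int) (num : Int) :
    (if num ∈ cur then (PySem.List.remove? cur num).getD cur else cur) = cur.erase num := by
  by_cases h : num ∈ cur
  · rw [if_pos h, PySem.List.remove?_eq_some_erase cur num h, Option.getD_some]
  · rw [if_neg h, List.erase_of_not_mem h]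

-- ===== VERDICT (by name: the statement is the Claim_ definition above) =====
theorem calculate_remaining_numbers_spec : Claim_equal_calculate_remaining_numbers := by
  intro rn step _ _
  show _ = _
  unfold calculate_remaining_numbers calculate_remaining_numbers_alt
  simp only [PySem.Dict.foldl_insert_getD_add_one_eq_counter]
  rw [pass_eq_model]
  rw [pvModel_congr rn (c' := pvCf [PySem.Dict.getD ⟨step⟩ "numberX" 0, PySem.Dict.getD ⟨step⟩ "numberY" 0])]
  · rw [pvModel_cf_pair]
    simp only [List.foldl_cons, List.foldl_nil, a_step_eq_erase, List.nil_append]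
  · intro e
    rw [PySem.Dict.getD_counter]
    rfl
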